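-- pv_equiv track=rewrite | github.com/madisonchamberlain/Hexapawn | hexapawn.py | num_white_clear_path
-- ===== SOURCE A (Python) =====
-- def get_color_locations (board, color):
--   color_locs = []
--   # look through each character on the board
--   if board == None:
--     return None
--   for i in range(len(board)):
--     for j in range(len(board[i])):
--       # if character is color, record its location
--       if board[i][j] == color:
--         color_locs.append([i, j])
--   return color_locs
--
-- def num_white_clear_path(board):
--   clear = 0
--   white_locs = get_color_locations(board, "w")
--   for white in white_locs:
--     non_empty = 0
--     for i in range(white[0] + 1, len(board)):
--       # if a non dash is found, the column is not empty
--       if board[i][white[1]] != "-":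
--         non_empty += 1
--     if non_empty == 0:
--       clear += 1
--   return clear
-- ===== SOURCE B (Python) =====
-- def num_white_clear_path(board):
--     # One bottom-up pass over the rows: a column is "clear below" a cell iff no non-dash
--     # cell has been seen in that column in the rows already scanned.
--     clear = 0
--     blocked = set()
--     for row in reversed(board):
--         for j, ch in enumerate(row):
--             if ch == "w" and j not in blocked:
--                 clear += 1
--         for j, ch in enumerate(row):
--             if ch != "-":
--                 blocked.add(j)
--     return clear
-- ===== Notes on version B (the rewrite author's own statement) =====
-- stated objective: alternative
-- what changed: Replaces the per-white-piece rescan of all rows below (nested loops over absolute indices) by a single bottom-up pass that maintains a set of blocked columns.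
import Mathlib
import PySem

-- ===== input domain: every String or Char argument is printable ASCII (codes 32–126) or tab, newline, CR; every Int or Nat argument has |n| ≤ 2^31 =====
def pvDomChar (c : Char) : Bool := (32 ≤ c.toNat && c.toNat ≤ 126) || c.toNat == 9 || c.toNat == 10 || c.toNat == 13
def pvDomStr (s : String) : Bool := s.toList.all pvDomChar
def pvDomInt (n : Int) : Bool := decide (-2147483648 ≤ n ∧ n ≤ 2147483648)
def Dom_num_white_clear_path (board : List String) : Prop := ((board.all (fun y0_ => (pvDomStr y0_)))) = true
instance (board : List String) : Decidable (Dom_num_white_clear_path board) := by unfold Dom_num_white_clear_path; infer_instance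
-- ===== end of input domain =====

-- ===== PORT A =====
def get_color_locations (board : List String) (color : Char) : List (Int × Int) :=
  (PySem.List.pyRange 0 (PySem.List.len board) 1).foldl (fun locs i =>
    (PySem.List.pyRange 0 (PySem.List.len (PySem.List.pyGetD board i "").toList) 1).foldl (fun locs2 j =>
      if PySem.List.pyGetD (PySem.List.pyGetD board i "").toList j ' ' = color then
        locs2 ++ [(i, j)]
      else locs2) locs) []

def num_white_clear_path (board : List String) : Int :=
  (get_color_locations board 'w').foldl (fun clear white =>
    let non_empty : Int :=
      (PySem.List.pyRange (white.1 + 1) (PySem.List.len board) 1).foldl (fun ne i =>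
        if PySem.List.pyGetD (PySem.List.pyGetD board i "").toList white.2 ' ' ≠ '-' then ne + 1
        else ne) 0
    if non_empty = 0 then clear + 1 else clear) 0

-- ===== PORT B =====
-- B: one bottom-up pass keeping a set of blocked columns instead of rescanning the rows below each white piece.
def num_white_clear_path_alt (board : List String) : Int :=
  (board.reverse.foldl (fun (st : Int × PySem.Set Int) row =>
    let clear := (PySem.List.enumerate row.toList 0).foldl (fun c p =>
      if p.2 == 'w' && !(PySem.Set.contains st.2 p.1) then c + 1 else c) st.1
    let blocked := (PySem.List.enumerate row.toList 0).foldl (fun s p =>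
      if p.2 ≠ '-' then PySem.Set.add s p.1 else s) st.2
    (clear, blocked)) ((0 : Int), PySem.Set.empty)).1

-- ===== PRECONDITION & SPEC =====
-- Pre_ excludes exactly the ragged boards on which A raises IndexError: some 'w' at (i, j)
-- with a later row shorter than j+1.
def Pre_num_white_clear_path (board : List String) : Prop :=
  ∀ i : Fin board.length, ∀ j : Fin board[i].toList.length, board[i].toList[j] = 'w' →
    ∀ k : Fin board.length, i.1 < k.1 → j.1 < board[k].toList.length
instance (board : List String) : Decidable (Pre_num_white_clear_path board) := by
  unfold Pre_num_white_clear_path; infer_instance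
def pvWitness_num_white_clear_path : List String := ["--w", "---", "-b-"]
def Spec_num_white_clear_path (board : List String) (out : Int) : Prop := out = num_white_clear_path_alt board
instance (board : List String) (out : Int) : Decidable (Spec_num_white_clear_path board out) := by unfold Spec_num_white_clear_path; infer_instance

-- ===== CLAIM (what is proved, stated in full; the proofs are below) =====
def Claim_equal_num_white_clear_path : Prop := ∀ (board : List String), Dom_num_white_clear_path board → Pre_num_white_clear_path board → Spec_num_white_clear_path board (num_white_clear_path board)

-- ===== LEMMAS AND PROOFS =====

-- proof-only definitions: per-row clear count and the recursive row spec
def pvRc (r : String) (rest : List String) : Int :=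
  ((List.range r.toList.length).countP (fun j =>
    (r.toList.getD j ' ' == 'w') && rest.all (fun q => q.toList.getD j '-' == '-')) : Int)

def pvS : List String → Int
  | [] => 0
  | r :: rest => pvS rest + pvRc r rest

def pvStep (st : Int × PySem.Set Int) (row : String) : Int × PySem.Set Int :=
  let clear := (PySem.List.enumerate row.toList 0).foldl (fun c p =>
    if p.2 == 'w' && !(PySem.Set.contains st.2 p.1) then c + 1 else c) st.1
  let blocked := (PySem.List.enumerate row.toList 0).foldl (fun s p =>
    if p.2 ≠ '-' then PySem.Set.add s p.1 else s) st.2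
  (clear, blocked)

lemma pv_B_def (board : List String) :
    num_white_clear_path_alt board
      = (board.foldr (fun row st => pvStep st row) ((0 : Int), PySem.Set.empty)).1 := by
  simp [num_white_clear_path_alt, pvStep, List.foldl_reverse]

lemma pv_mem_addRow (cs : List Char) (m : Int) (s : PySem.Set Int) (x : Int) :
    (x ∈ (PySem.List.enumerate cs m).foldl
        (fun s p => if p.2 ≠ '-' then PySem.Set.add s p.1 else s) s)
      ↔ x ∈ s ∨ ∃ t : Nat, t < cs.length ∧ cs.getD t '-' ≠ '-' ∧ x = m + t := by
  induction cs generalizing m s with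
  | nil => simp [PySem.List.enumerate_nil]
  | cons c cs ih =>
    rw [PySem.List.enumerate_cons]
    simp only [List.foldl_cons, ih]
    constructor
    · rintro (hx | ⟨t, ht, hne, rfl⟩)
      · by_cases hc : c ≠ '-'
        · simp only [if_pos hc] at hx
          rcases (PySem.Set.mem_add s m x).mp hx with h | rfl
          · exact Or.inl h
          · exact Or.inr ⟨0, by simp, by simpa using hc, by simp⟩
          
        · simp only [if_neg hc] at hx; exact Or.inl hx
      · refine Or.inr ⟨t + 1, by simp; omega, by simpa using hne, by push_cast; ring⟩
    · rintro (hx | ⟨t, ht, hne, rfl⟩)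
      · left
        split
        · exact (PySem.Set.mem_add ..).mpr (Or.inl hx)
        · exact hx
      · match t with
        | 0 =>
          left
          have hc : c ≠ '-' := by simpa using hne
          rw [if_pos hc]
          exact (PySem.Set.mem_add ..).mpr (Or.inr (by simp))
        | t + 1 =>
          right
          exact ⟨t, by simp at ht ⊢; omega, by simpa using hne, by push_cast; ring⟩

lemma pv_blocked_inv (board : List String) (k : Nat) :
    ((k : Int) ∈ (board.foldr (fun row st => pvStep st row) ((0 : Int), PySem.Set.empty)).2)
      ↔ ∃ q ∈ board, q.toList.getD k '-' ≠ '-' := by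
  induction board with
  | nil => simp [PySem.Set.empty]
  | cons r rest ih =>
    simp only [List.foldr_cons]
    show ((k : Int) ∈ (PySem.List.enumerate r.toList 0).foldl
        (fun s p => if p.2 ≠ '-' then PySem.Set.add s p.1 else s) _) ↔ _
    rw [pv_mem_addRow, ih]
    constructor
    · rintro (⟨q, hq, hne⟩ | ⟨t, ht, hne, hk⟩)
      · exact ⟨q, List.mem_cons_of_mem _ hq, hne⟩
      · have : t = k := by omega
        subst this
        exact ⟨r, List.mem_cons_self .., hne⟩
    · rintro ⟨q, hq, hne⟩
      rcases List.mem_cons.mp hq with rfl | hq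
      · right
        have hk : k < q.toList.length := by
          by_contra h
          exact hne (List.getD_eq_default _ _ (by omega))
        exact ⟨k, hk, hne, by simp⟩
      · exact Or.inl ⟨q, hq, hne⟩

lemma pv_cnt_row (cs : List Char) (s : PySem.Set Int) (c : Int) (rest : List String)
    (hs : ∀ k : Nat, ((k : Int) ∈ s) ↔ ∃ q ∈ rest, q.toList.getD k '-' ≠ '-') :
    (PySem.List.enumerate cs 0).foldl
        (fun c p => if p.2 == 'w' && !(PySem.Set.contains s p.1) then c + 1 else c) c
      = c + ((List.range cs.length).countP (fun j =>
          (cs.getD j ' ' == 'w') && rest.all (fun q => q.toList.getD j '-' == '-')) : Int) := by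
  rw [PySem.List.foldl_if_add_one]
  congr 2
  rw [PySem.List.enumerate_eq_map_pyRange (d := ' '), List.countP_map]
  rw [PySem.List.len_eq, PySem.List.pyRange_zero_natCast, List.countP_map]
  apply List.countP_congr
  intro k hk
  have hcont : PySem.Set.contains s (k : Int)
      = !(rest.all (fun q => q.toList.getD k '-' == '-')) := by
    by_cases hm : ((k : Int) ∈ s)
    · rcases (hs k).mp hm with ⟨q, hq, hne⟩
      have h2 : (rest.all fun q => q.toList.getD k '-' == '-') = false := by
        by_contra h
        rw [Bool.not_eq_false, List.all_eq_true] at h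
        exact hne (by simpa using h q hq)
      rw [h2]
      simp only [Bool.not_false, PySem.Set.contains_iff]
      exact hm
    · have h2 : (rest.all fun q => q.toList.getD k '-' == '-') = true :=
        List.all_eq_true.mpr (fun q hq => beq_iff_eq.mpr (by
          by_contra h
          exact hm ((hs k).mpr ⟨q, hq, h⟩)))
      rw [h2]
      simp only [Bool.not_true]
      rw [Bool.eq_false_iff]
      intro hc
      exact hm (by simpa [PySem.Set.contains_iff] using hc)
  simp only [Function.comp, hcont]
  simp [PySem.List.pyGetD_natCast]

lemma pvStep_fst (st : Int × PySem.Set Int) (row : String) :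
    (pvStep st row).1 = (PySem.List.enumerate row.toList 0).foldl (fun c p =>
      if p.2 == 'w' && !(PySem.Set.contains st.2 p.1) then c + 1 else c) st.1 := rfl

lemma pv_B_eq_S (board : List String) : num_white_clear_path_alt board = pvS board := by
  rw [pv_B_def]
  induction board with
  | nil => simp [pvS]
  | cons r rest ih =>
    rw [List.foldr_cons, pvStep_fst, pv_cnt_row r.toList _ _ rest (pv_blocked_inv rest), ih]
    simp [pvS, pvRc]

lemma pv_S_closed (board : List String) :
    pvS board = ((List.range board.length).map
      (fun i => pvRc (board.getD i "") (board.drop (i + 1)))).sum := by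
  induction board with
  | nil => simp [pvS]
  | cons r rest ih =>
    rw [List.length_cons, List.range_succ_eq_map, List.map_cons, List.sum_cons, List.map_map]
    have h2 : ((List.range rest.length).map
        ((fun i => pvRc ((r :: rest).getD i "") ((r :: rest).drop (i + 1))) ∘ Nat.succ))
        = (List.range rest.length).map (fun i => pvRc (rest.getD i "") (rest.drop (i + 1))) := by
      apply List.map_congr_left
      intro i _
      simp [Function.comp]
    rw [h2, ← ih]
    simp [pvS]
    omega

lemma pv_countP_flatMap {α β : Type} (l : List α) (f : α → List β) (p : β → Bool) :
    (l.flatMap f).countP p = (l.map (fun a => (f a).countP p)).sum := by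
  induction l with
  | nil => simp
  | cons x xs ih => simp [List.countP_append, ih]

lemma pv_gcl_eq (board : List String) :
    get_color_locations board 'w'
      = (PySem.List.pyRange 0 (PySem.List.len board) 1).flatMap (fun i =>
          ((PySem.List.pyRange 0 (PySem.List.len (PySem.List.pyGetD board i "").toList) 1).filter
              (fun j => decide (PySem.List.pyGetD (PySem.List.pyGetD board i "").toList j ' ' = 'w'))).map
            (fun j => (i, j))) := by
  unfold get_color_locations
  have hinner : ∀ x ∈ PySem.List.pyRange 0 (PySem.List.len board) 1, ∀ locs : List (Int × Int),
      (PySem.List.pyRange 0 (PySem.List.len (PySem.List.pyGetD board x "").toList) 1).foldl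
        (fun locs2 j => if PySem.List.pyGetD (PySem.List.pyGetD board x "").toList j ' ' = 'w'
          then locs2 ++ [(x, j)] else locs2) locs
      = locs ++ ((PySem.List.pyRange 0 (PySem.List.len (PySem.List.pyGetD board x "").toList) 1).filter
            (fun j => decide (PySem.List.pyGetD (PySem.List.pyGetD board x "").toList j ' ' = 'w'))).map
          (fun j => (x, j)) := by
    intro x _ locs
    rw [PySem.List.foldl_append_ite]
  exact Eq.trans (PySem.List.foldl_congr_mem' _ _ _ _ hinner)
    (by rw [PySem.List.foldl_append_eq_flatMap]; simp)

lemma pv_cell (board : List String) (hpre : Pre_num_white_clear_path board)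
    (t : Nat) (ht : t < board.length) :
    (((((PySem.List.pyRange 0 (PySem.List.len (PySem.List.pyGetD board (t : Int) "").toList) 1).filter
        (fun j => decide (PySem.List.pyGetD (PySem.List.pyGetD board (t : Int) "").toList j ' ' = 'w'))).map
        (fun j => ((t : Int), j))).countP (fun w => decide
          ((PySem.List.pyRange (w.1 + 1) (PySem.List.len board) 1).foldl (fun ne i =>
            if PySem.List.pyGetD (PySem.List.pyGetD board i "").toList w.2 ' ' ≠ '-' then ne + 1
            else ne) (0 : Int) = 0))) : Int)
      = pvRc (board.getD t "") (board.drop (t + 1)) := by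
  rw [List.countP_map, List.countP_filter]
  simp only [PySem.List.pyGetD_natCast, PySem.List.len_eq]
  rw [PySem.List.pyRange_zero_natCast, List.countP_map]
  unfold pvRc
  congr 1
  apply List.countP_congr
  intro k hk
  have hkcs : k < (board.getD t "").toList.length := List.mem_range.mp hk
  simp only [Function.comp, PySem.List.pyGetD_natCast]
  by_cases hw : (board.getD t "").toList.getD k ' ' = 'w'
  · have h1 : board.getD t "" = board[t] := List.getD_eq_getElem board "" ht
    rw [h1] at hkcs
    have hwE : board[t].toList[k]'hkcs = 'w' := by
      rw [← List.getD_eq_getElem board[t].toList ' ' hkcs, ← h1]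
      exact hw
    have hk' : ∀ row ∈ board.drop (t + 1), k < row.toList.length := by
      intro row hrow
      rcases List.mem_iff_getElem.mp hrow with ⟨m, hm, rfl⟩
      rw [List.getElem_drop]
      have hmlen : t + 1 + m < board.length := by
        have := List.length_drop (l := board) (i := t + 1)
        omega
      exact hpre ⟨t, ht⟩ ⟨k, hkcs⟩ hwE ⟨t + 1 + m, hmlen⟩ (by simp; omega)
    rw [PySem.List.foldl_pyRange_pyGetD' (f := fun ne row =>
      if row.toList.getD k ' ' ≠ '-' then ne + 1 else ne)
      (d := "") (init := (0 : Int)) (a := (t : Int) + 1) (xs := board) (by omega)]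
    have htoNat : ((t : Int) + 1).toNat = t + 1 := by omega
    rw [htoNat]
    rw [PySem.List.foldl_ite_add_one, zero_add]
    rw [Bool.eq_iff_iff]
    simp only [Bool.and_eq_true, decide_eq_true_eq, Nat.cast_eq_zero, List.countP_eq_zero,
      List.all_eq_true, beq_iff_eq]
    rw [iff_true]
    constructor
    · rintro ⟨hall, hw2⟩
      refine ⟨hw2, fun q hq => ?_⟩
      have h3 := not_not.mp (hall q hq)
      rw [List.getD_eq_getElem _ _ (hk' q hq)] at h3
      rw [List.getD_eq_getElem _ _ (hk' q hq)]
      exact h3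
    · rintro ⟨hw2, hall⟩
      refine ⟨fun q hq => ?_, hw2⟩
      have h3 := hall q hq
      rw [List.getD_eq_getElem _ _ (hk' q hq)] at h3
      rw [not_not, List.getD_eq_getElem _ _ (hk' q hq)]
      exact h3
  · have h1 : ((board.getD t "").toList.getD k ' ' == 'w') = false := by
      simpa using hw
    have h2 : decide ((board.getD t "").toList.getD k ' ' = 'w') = false := by
      simpa using hw
    rw [h1, h2, Bool.and_false, Bool.false_and]

lemma pv_A_eq_S (board : List String) (hpre : Pre_num_white_clear_path board) :
    num_white_clear_path board = pvS board := by
  simp only [num_white_clear_path]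
  rw [pv_gcl_eq]
  rw [PySem.List.foldl_ite_add_one (p := fun (white : Int × Int) =>
    (PySem.List.pyRange (white.1 + 1) (PySem.List.len board) 1).foldl (fun ne i =>
      if PySem.List.pyGetD (PySem.List.pyGetD board i "").toList white.2 ' ' ≠ '-' then ne + 1
      else ne) (0 : Int) = 0)]
  rw [zero_add, pv_countP_flatMap]
  rw [pv_S_closed]
  rw [PySem.List.len_eq, PySem.List.pyRange_zero_natCast, List.map_map]
  rw [Nat.cast_list_sum, List.map_map]
  congr 1
  apply List.map_congr_left
  intro t ht
  exact pv_cell board hpre t (List.mem_range.mp ht)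

-- ===== VERDICT (by name: the statement is the Claim_ definition above) =====
theorem num_white_clear_path_spec : Claim_equal_num_white_clear_path := by
  intro board _ hpre
  unfold Spec_num_white_clear_path
  rw [pv_A_eq_S board hpre, pv_B_eq_S board]
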